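-- pv_equiv track=rewrite | github.com/junzel/uci-statnlp | hw2/lm.py | combination_gen
-- ===== SOURCE A (Python) =====
-- def combination_gen(sentence, comb=2):
--     """Generate all possible combination in a sentence with the length of combination"""
--
--     # With SOS
--     output = []
--     for i in range(-1 , len(sentence) + 2 - comb): # [len(sentence + 2) + 2 - comb + 1] iterations
--         tup = []
--         for j in range(comb):
--             if i+j < 0:
--                 tup.append('START_OF_SENTENCE')
--             elif i+j < len(sentence):
--                 tup.append(sentence[i+j])
--             else: # There can't be two steps exceeds the length of the sentence
--                 tup.append('END_OF_SENTENCE')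
--         output.append(tuple(tup))
--     return output
-- ===== SOURCE B (Python) =====
-- def combination_gen(sentence, comb=2):
--     """Generate all possible combination in a sentence with the length of combination"""
--     padded = ['START_OF_SENTENCE'] + list(sentence) + ['END_OF_SENTENCE']
--     return [tuple(padded[k + j] for j in range(comb))
--             for k in range(len(padded) - comb + 1)]
-- ===== Notes on version B (the rewrite author's own statement) =====
-- stated objective: simpler
-- what changed: B pads the sentence once with START/END markers and then emits each length-comb window by uniform branch-free indexing into the padded list, replacing A's per-position three-way START/in-range/END branching inside the nested loop.
import Mathlib
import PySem

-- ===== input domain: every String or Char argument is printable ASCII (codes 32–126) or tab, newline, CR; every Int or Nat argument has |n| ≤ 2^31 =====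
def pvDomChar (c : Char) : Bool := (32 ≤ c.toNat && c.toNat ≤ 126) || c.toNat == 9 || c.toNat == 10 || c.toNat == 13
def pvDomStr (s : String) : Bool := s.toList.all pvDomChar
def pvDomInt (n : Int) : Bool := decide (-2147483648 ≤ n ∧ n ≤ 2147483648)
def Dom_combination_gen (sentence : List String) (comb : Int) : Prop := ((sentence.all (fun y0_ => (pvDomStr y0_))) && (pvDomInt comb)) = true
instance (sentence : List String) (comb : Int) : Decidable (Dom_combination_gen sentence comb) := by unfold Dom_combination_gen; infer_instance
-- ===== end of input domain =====

-- B pads the sentence once with START/END markers and emits each window by uniform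
-- branch-free indexing, replacing A's per-position three-way branching (objective: simpler).

-- ===== PORT A =====
-- literal transliteration of A: outer loop over range(-1, len(sentence)+2-comb),
-- inner loop over range(comb) with the three-way branch, appending to accumulators.
-- each .append(x) is the usual cons-accumulator with one final reverse (linear, same loops)
def combination_gen (sentence : List String) (comb : Int) : List (List String) :=
  -- sentence.toArray gives Python's O(1) reads of the same elements (indices here are in range)
  let arr := sentence.toArray
  ((PySem.List.pyRange (-1) ((sentence.length : Int) + 2 - comb)).foldl
    (fun output i =>
      (((PySem.List.pyRange 0 comb).foldl
        (fun tup j =>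
          if i + j < 0 then "START_OF_SENTENCE" :: tup
          else if i + j < (sentence.length : Int) then
            -- the elif branch guarantees 0 ≤ i+j < len(sentence), so indexing cannot raise
            arr.getD (i + j).toNat "" :: tup
          else "END_OF_SENTENCE" :: tup) []).reverse) :: output) []).reverse

-- ===== PORT B =====
-- literal transliteration of B: build padded once, then a nested comprehension
-- [tuple(padded[k+j] for j in range(comb)) for k in range(len(padded)-comb+1)].
def combination_gen_alt (sentence : List String) (comb : Int) : List (List String) :=
  let padded := ["START_OF_SENTENCE"] ++ sentence ++ ["END_OF_SENTENCE"]
  -- padded.toArray gives Python's O(1) reads; 0 ≤ k+j < padded.length whenever the inner range is nonempty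
  let arr := padded.toArray
  (PySem.List.pyRange 0 ((padded.length : Int) - comb + 1)).map
    (fun k => (PySem.List.pyRange 0 comb).map
      (fun j => arr.getD (k + j).toNat ""))

-- ===== PRECONDITION & SPEC =====
def Spec_combination_gen (sentence : List String) (comb : Int) (out : List (List String)) : Prop := out = combination_gen_alt sentence comb
instance (sentence : List String) (comb : Int) (out : List (List String)) : Decidable (Spec_combination_gen sentence comb out) := by unfold Spec_combination_gen; infer_instance

-- ===== CLAIM (what is proved, stated in full; the proofs are below) =====
def Claim_equal_combination_gen : Prop := ∀ (sentence : List String) (comb : Int), Dom_combination_gen sentence comb → Spec_combination_gen sentence comb (combination_gen sentence comb)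

-- ===== LEMMAS AND PROOFS =====

-- range(a, a+n) with the default step 1 is the arithmetic list a, a+1, …, a+n-1
theorem pyRange_one_add_nat (n : Nat) : ∀ a : Int,
    PySem.List.pyRange a (a + (n : Int)) = (List.range n).map (fun k : Nat => a + (k : Int)) := by
  induction n with
  | zero =>
    intro a
    refine List.eq_nil_iff_forall_not_mem.mpr fun x hx => ?_
    have h := PySem.List.mem_pyRange_one.mp hx
    omega
  | succ n ih =>
    intro a
    rw [PySem.List.pyRange_one_cons (by omega : a < a + ((n + 1 : Nat) : Int)),
      show a + ((n + 1 : Nat) : Int) = (a + 1) + (n : Int) by push_cast; ring, ih (a + 1),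
      List.range_succ_eq_map, List.map_cons, List.map_map]
    refine congrArg₂ _ (by simp) (List.map_congr_left fun k _ => ?_)
    simp only [Function.comp_apply, Nat.succ_eq_add_one]
    push_cast
    ring

-- range(a, b) with the default step 1 is the arithmetic list a, a+1, …, b-1
theorem pyRange_one_eq (a b : Int) :
    PySem.List.pyRange a b = (List.range (b - a).toNat).map (fun k : Nat => a + (k : Int)) := by
  by_cases h : a < b
  · obtain ⟨n, hn⟩ : ∃ n : Nat, b = a + (n : Int) := ⟨(b - a).toNat, by omega⟩
    subst hn
    rw [pyRange_one_add_nat, show ((a + (n : Int)) - a).toNat = n by omega]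
  · rw [show (b - a).toNat = 0 by omega, List.range_zero, List.map_nil]
    refine List.eq_nil_iff_forall_not_mem.mpr fun x hx => ?_
    have hx' := PySem.List.mem_pyRange_one.mp hx
    omega

-- A's outer cons-accumulator loop is the reversed map of its body
theorem foldl_cons_eq_reverse_map (g : Int → List String) (l : List Int) (acc : List (List String)) :
    l.foldl (fun output i => g i :: output) acc = (l.map g).reverse ++ acc := by
  induction l generalizing acc with
  | nil => simp
  | cons x xs ih => simp [ih]

-- an Array.getD read of a list's array is the list's getD
theorem toArray_getD {α : Type} (l : List α) (i : Nat) (d : α) :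
    l.toArray.getD i d = l.getD i d := by
  by_cases h : i < l.length
  · simp [Array.getD, h, List.getD]
  · simp [Array.getD, h, List.getD]

-- A's inner accumulator loop is the map of its branch expression
theorem foldl_branch_eq_map (s : List String) (i : Int) (l : List Int) (acc : List String) :
    l.foldl (fun tup j =>
      if i + j < 0 then "START_OF_SENTENCE" :: tup
      else if i + j < (s.length : Int) then s.toArray.getD (i + j).toNat "" :: tup
      else "END_OF_SENTENCE" :: tup) acc
    = (l.map (fun j =>
        if i + j < 0 then "START_OF_SENTENCE"
        else if i + j < (s.length : Int) then s.toArray.getD (i + j).toNat ""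
        else "END_OF_SENTENCE")).reverse ++ acc := by
  induction l generalizing acc with
  | nil => simp
  | cons x xs ih =>
    simp only [List.foldl_cons, List.map_cons]
    rw [ih]
    split_ifs <;> simp

theorem combination_gen_eq_alt (s : List String) (c : Int) :
    combination_gen s c = combination_gen_alt s c := by
  unfold combination_gen combination_gen_alt
  simp only [foldl_cons_eq_reverse_map, foldl_branch_eq_map, List.append_nil,
    List.reverse_reverse]
  rw [pyRange_one_eq (-1) ((s.length : Int) + 2 - c),
    pyRange_one_eq 0 (((["START_OF_SENTENCE"] ++ s ++ ["END_OF_SENTENCE"]).length : Int) - c + 1),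
    List.map_map, List.map_map]
  have hN : ((s.length : Int) + 2 - c - (-1)).toNat
      = (((["START_OF_SENTENCE"] ++ s ++ ["END_OF_SENTENCE"]).length : Int) - c + 1 - 0).toNat := by
    simp only [List.length_append, List.length_cons, List.length_nil]
    omega
  rw [hN]
  refine List.map_congr_left fun t ht => ?_
  have ht' : (t : Int) < (s.length : Int) + 3 - c := by
    have h := List.mem_range.mp ht
    simp only [List.length_append, List.length_cons, List.length_nil] at h
    omega
  simp only [Function.comp]
  rw [pyRange_one_eq 0 c, List.map_map, List.map_map]
  refine List.map_congr_left fun j hj => ?_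
  have hj' : (j : Int) < c := by
    have h := List.mem_range.mp hj
    omega
  simp only [Function.comp]
  have hidx : ((0 : Int) + (t : Int)) + ((0 : Int) + (j : Int)) = ((t + j : Nat) : Int) := by
    push_cast; ring
  rw [hidx]
  simp only [toArray_getD, Int.toNat_natCast]
  split_ifs with h1 h2
  · -- i + j < 0 : only when t + j = 0, the START marker
    rw [show t + j = 0 by omega]
    rfl
  · -- 0 ≤ i + j < len(sentence) : a word of the sentence
    obtain ⟨m, hm⟩ : ∃ m, t + j = m + 1 := ⟨t + j - 1, by omega⟩
    have hv : (-1 + (t : Int)) + ((0 : Int) + (j : Int)) = (m : Int) := by omega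
    rw [hv, Int.toNat_natCast, hm, List.append_assoc, List.singleton_append,
      List.getD_cons_succ]
    have hmlt : m < s.length := by omega
    simp [List.getD, List.getElem?_append_left hmlt]
  · -- i + j ≥ len(sentence) : only when t + j = len + 1, the END marker
    rw [show t + j = s.length + 1 by omega, List.append_assoc, List.singleton_append,
      List.getD_cons_succ]
    simp [List.getD]

-- ===== VERDICT (by name: the statement is the Claim_ definition above) =====
theorem combination_gen_spec : Claim_equal_combination_gen := by
  intro s c _
  unfold Spec_combination_gen
  exact combination_gen_eq_alt s c
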